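-- pv_equiv track=rewrite | github.com/chadwellwalker/Snipewins | comp_query.py | _primary_set
-- ===== SOURCE A (Python) =====
-- from typing import Any, Dict, FrozenSet, List, Optional, Set, Tuple
--
-- def _primary_set(sets: Set[str]) -> Optional[str]:
--     if not sets:
--         return None
--     # When both "mosaic" AND "prizm" appear, the card is Mosaic —
--     # "Prizm" is part of the parallel name ("Silver Prizm"), not the product.
--     # Mosaic Silver Prizm != Panini Prizm. Give mosaic precedence.
--     if "mosaic" in sets and "prizm" in sets:
--         return "mosaic"
--     priority = (
--         "nationaltreasures",
--         "immaculate",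
--         "flawless",
--         "spectra",
--         "absolute",
--         "totallycertified",
--         "bowmanchrome",
--         "select",
--         "prizm",
--         "optic",
--         "mosaic",
--         "donruss",
--         "contenders",
--         "chronicles",
--         "toppschrome",
--         "bowman",
--         "topps",
--     )
--     for p in priority:
--         if p in sets:
--             return p
--     return next(iter(sorted(sets)), None)
-- ===== SOURCE B (Python) =====
-- from typing import Optional, Set
--
-- _RANK = {name: i for i, name in enumerate(
--     "nationaltreasures immaculate flawless spectra absolute totallycertified "
--     "bowmanchrome select prizm optic mosaic donruss contenders chronicles "
--     "toppschrome bowman topps".split())}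
--
--
-- def _primary_set(sets: Set[str]) -> Optional[str]:
--     if not sets:
--         return None
--     # Both present -> the product is Mosaic (see A's comment): collapse the pool.
--     pool = {"mosaic"} if {"mosaic", "prizm"} <= sets else sets
--     # Lowest (rank, name) wins; unknown names rank last and tie alphabetically,
--     # which reproduces the sorted-minimum fallback.
--     return sorted(pool, key=lambda s: (_RANK.get(s, len(_RANK)), s))[0]
-- ===== Notes on version B (the rewrite author's own statement) =====
-- stated objective: idiomatic
-- what changed: Replaces the 17-step membership scan over the priority tuple plus a separate sorted() fallback by one sort of the input keyed by (precomputed rank, name) taking the first element, with the mosaic+prizm case handled by collapsing the pool instead of an early return.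
import Mathlib
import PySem

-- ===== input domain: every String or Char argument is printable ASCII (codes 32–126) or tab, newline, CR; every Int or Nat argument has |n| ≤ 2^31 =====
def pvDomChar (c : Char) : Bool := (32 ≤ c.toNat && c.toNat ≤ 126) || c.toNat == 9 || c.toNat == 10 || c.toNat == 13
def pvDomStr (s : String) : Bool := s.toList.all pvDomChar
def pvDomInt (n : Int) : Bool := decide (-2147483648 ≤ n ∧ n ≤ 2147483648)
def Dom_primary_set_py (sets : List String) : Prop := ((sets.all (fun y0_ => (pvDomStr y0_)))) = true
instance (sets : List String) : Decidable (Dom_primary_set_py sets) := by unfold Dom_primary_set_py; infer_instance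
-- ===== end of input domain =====

-- B replaces A's 17-step scan over the priority tuple plus a separate sorted() fallback by one
-- sort of the input keyed by (precomputed rank, name) taking the first element, with the
-- mosaic+prizm case handled by collapsing the pool; idiomatic, same cost class.


-- ===== PORT A =====
-- the 'priority' tuple of A
def priorityA : List String :=
  ["nationaltreasures", "immaculate", "flawless", "spectra", "absolute",
   "totallycertified", "bowmanchrome", "select", "prizm", "optic", "mosaic",
   "donruss", "contenders", "chronicles", "toppschrome", "bowman", "topps"]

def primary_set_py (sets : List String) : Option String :=
  if sets = [] then none
  else if "mosaic" ∈ sets ∧ "prizm" ∈ sets then some "mosaic"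
  else
    -- 'for p in priority: if p in sets: return p' = first hit of the scan
    match List.find? (fun p => decide (p ∈ sets)) priorityA with
    | some p => some p
    | none => (PySem.List.sorted sets (fun x => x)).head?   -- next(iter(sorted(sets)), None)

-- ===== PORT B =====
-- _RANK = {name: i for i, name in enumerate("nationaltreasures immaculate … topps".split())}
def rankTable : PySem.Dict String Int :=
  (PySem.List.enumerate (PySem.Str.split₀
    "nationaltreasures immaculate flawless spectra absolute totallycertified bowmanchrome select prizm optic mosaic donruss contenders chronicles toppschrome bowman topps")).foldl
    (fun d p => d.insert p.2 p.1) PySem.Dict.empty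

def primary_set_py_alt (sets : List String) : Option String :=
  if sets = [] then none
  else
    -- pool = {"mosaic"} if {"mosaic","prizm"} <= sets else sets
    -- sorted(pool, key=lambda s: (_RANK.get(s, len(_RANK)), s))[0]; pool is nonempty here, so [0] = head?
    (PySem.List.sorted2
      (if "mosaic" ∈ sets ∧ "prizm" ∈ sets then ["mosaic"] else sets)
      (fun s => rankTable.getD s 17) (fun s => s)).head?

-- ===== PRECONDITION & SPEC =====
def Spec_primary_set_py (sets : List String) (out : Option String) : Prop := out = primary_set_py_alt sets
instance (sets : List String) (out : Option String) : Decidable (Spec_primary_set_py sets out) := by unfold Spec_primary_set_py; infer_instance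

-- ===== CLAIM (what is proved, stated in full; the proofs are below) =====
def Claim_equal_primary_set_py : Prop := ∀ (sets : List String), Dom_primary_set_py sets → Spec_primary_set_py sets (primary_set_py sets)

-- ===== LEMMAS AND PROOFS =====

-- rank of a string under B's dict (proof-only abbreviation, defeq to the key in port B)
def rk (s : String) : Int := rankTable.getD s 17

-- strict lexicographic order on B's sort key (rank s, s)
def LL (a b : String) : Prop := rk a < rk b ∨ (rk a = rk b ∧ a < b)

-- the boolean 'before' predicate that sorted2 uses with B's two keys
def ltB (a b : String) : Bool :=
  decide (rk a < rk b) || (!decide (rk b < rk a) && decide (a < b))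

lemma LL_irrefl (a : String) : ¬ LL a a := by
  rintro (h | ⟨_, h⟩)
  · omega
  · exact lt_irrefl _ h

lemma LL_trans {a b c : String} (h1 : LL a b) (h2 : LL b c) : LL a c := by
  rcases h1 with h1 | ⟨e1, l1⟩ <;> rcases h2 with h2 | ⟨e2, l2⟩
  · exact Or.inl (by omega)
  · exact Or.inl (by omega)
  · exact Or.inl (by omega)
  · exact Or.inr ⟨by omega, lt_trans l1 l2⟩

lemma ltB_iff (a b : String) : ltB a b = true ↔ LL a b := by
  unfold ltB LL
  by_cases h1 : rk a < rk b
  · simp [h1]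
  · by_cases h2 : rk b < rk a
    · have hne : rk a ≠ rk b := by omega
      simp [h1, h2, hne]
    · have he : rk a = rk b := by omega
      simp [he]

-- the two defining equations of PySem.List.insertBy, named for rewriting
lemma insertBy_nil (before : String → String → Bool) (x : String) :
    PySem.List.insertBy before x [] = [x] := rfl

lemma insertBy_cons (before : String → String → Bool) (x c : String) (t : List String) :
    PySem.List.insertBy before x (c :: t)
      = if before x c then x :: c :: t else c :: PySem.List.insertBy before x t := rfl

-- "head is LL-minimal" invariant of B's insertion sort
def HM (l : List String) : Prop := ∀ h, l.head? = some h → ∀ y ∈ l, ¬ LL y h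

lemma HM_insertBy {l : List String} (hl : HM l) (x : String) :
    HM (PySem.List.insertBy ltB x l) := by
  cases l with
  | nil =>
    intro h hh y hy
    rw [insertBy_nil] at hh hy
    simp only [List.head?] at hh
    injection hh with hh; subst hh
    simp at hy; subst hy; exact LL_irrefl _
  | cons c t =>
    by_cases hx : ltB x c = true
    · have hxc : LL x c := (ltB_iff x c).mp hx
      intro h hh y hy
      rw [insertBy_cons, if_pos hx] at hh hy
      simp only [List.head?] at hh
      injection hh with hh; subst hh
      rcases List.mem_cons.mp hy with rfl | hy'
      · exact LL_irrefl _
      · intro hLL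
        have hyc : ¬ LL y c := hl c rfl y hy'
        exact hyc (LL_trans hLL hxc)
    · intro h hh y hy
      rw [insertBy_cons, if_neg hx] at hh hy
      simp only [List.head?] at hh
      injection hh with hh; subst hh
      rcases List.mem_cons.mp hy with rfl | hy'
      · exact LL_irrefl _
      · rcases (PySem.List.mem_insertBy ltB x y t).mp hy' with rfl | hyt
        · intro hLL
          exact hx ((ltB_iff y c).mpr hLL)
        · exact hl c rfl y (List.mem_cons_of_mem _ hyt)

lemma HM_foldl (xs : List String) : ∀ acc, HM acc →
    HM (xs.foldl (fun acc x => PySem.List.insertBy ltB x acc) acc) := by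
  induction xs with
  | nil => exact fun acc h => h
  | cons x xs ih =>
    intro acc hacc
    exact ih _ (HM_insertBy hacc x)

lemma sorted2_eq_fold (xs : List String) :
    PySem.List.sorted2 xs (fun s => rankTable.getD s 17) (fun s => s) false
      = xs.foldl (fun acc x => PySem.List.insertBy ltB x acc) [] := rfl

-- B's sorted-head returns a when a is in the list and its key dominates every other element
lemma sorted2_head_of_dom (xs : List String) (a : String) (ha : a ∈ xs)
    (hdom : ∀ y ∈ xs, y = a ∨ LL a y) :
    (PySem.List.sorted2 xs (fun s => rankTable.getD s 17) (fun s => s) false).head? = some a := by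
  have hperm := PySem.List.sorted2_perm xs (fun s => rankTable.getD s 17) (fun s => s) false
  set r := PySem.List.sorted2 xs (fun s => rankTable.getD s 17) (fun s => s) false with hr
  have har : a ∈ r := (hperm.mem_iff).mpr ha
  cases hm : r.head? with
  | none =>
    rw [List.head?_eq_none_iff] at hm
    rw [hm] at har; cases har
  | some m =>
    have hmr : m ∈ r := List.mem_of_mem_head? hm
    have hmin : ¬ LL a m := by
      have := HM_foldl xs [] (by intro h hh y hy; cases hy)
      rw [← sorted2_eq_fold, ← hr] at this
      exact this m hm a har
    rcases hdom m (hperm.mem_iff.mp hmr) with rfl | hLL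
    · rfl
    · exact absurd hLL hmin

lemma priorityA_length : priorityA.length = 17 := rfl

set_option maxRecDepth 4000 in
lemma rk_at (j : Nat) (h : j < 17) : rk (priorityA[j]!) = (j : Int) := by
  have H : ∀ j : Fin 17, rk (priorityA[(j : Nat)]!) = ((j : Nat) : Int) := by decide
  exact H ⟨j, h⟩

set_option maxRecDepth 4000 in
lemma keys_rankTable : rankTable.keys = priorityA := by decide

lemma rk_of_not_mem {s : String} (h : s ∉ priorityA) : rk s = 17 := by
  have hk : rankTable.get? s = none := by
    rw [PySem.Dict.get?_eq_none_iff_not_mem_keys, keys_rankTable]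
    exact h
  exact PySem.Dict.getD_of_get?_eq_none _ _ hk

-- the first priority name found by A's scan strictly key-dominates every other member of sets
lemma dom_of_find?_eq_some {sets : List String} {p : String}
    (hf : List.find? (fun p => decide (p ∈ sets)) priorityA = some p) :
    p ∈ sets ∧ ∀ y ∈ sets, y = p ∨ LL p y := by
  obtain ⟨hp, as, bs, heq, hprev⟩ := List.find?_eq_some_iff_append.mp hf
  have hps : p ∈ sets := of_decide_eq_true hp
  have hlen : as.length + (bs.length + 1) = 17 := by
    have := priorityA_length
    rw [heq] at this
    simpa [List.length_append] using this
  have hasl : as.length < 17 := by omega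
  have hrkp : rk p = (as.length : Int) := by
    have hq : priorityA[as.length]? = some p := by
      rw [heq, List.getElem?_append_right (le_refl as.length), Nat.sub_self]
      rfl
    have hg : priorityA[as.length]! = p := by
      simp [List.getElem!_eq_getElem?_getD, hq]
    rw [← hg]
    exact rk_at _ hasl
  refine ⟨hps, ?_⟩
  intro y hy
  by_cases hyp : y ∈ priorityA
  · rw [heq] at hyp
    rcases List.mem_append.mp hyp with hyas | hybs
    · exact absurd hps (by
        have := hprev y hyas
        simp at this
        exact absurd hy this)
    · rcases List.mem_cons.mp hybs with rfl | hybs'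
      · exact Or.inl rfl
      · obtain ⟨j, hj, hyj⟩ := List.mem_iff_getElem.mp hybs'
        have hjlt : as.length + 1 + j < 17 := by omega
        have hq : priorityA[as.length + 1 + j]? = some y := by
          rw [heq, List.getElem?_append_right (by omega)]
          have hsub : as.length + 1 + j - as.length = j + 1 := by omega
          rw [hsub, List.getElem?_cons_succ, List.getElem?_eq_getElem hj, hyj]
        have hg : priorityA[as.length + 1 + j]! = y := by
          simp [List.getElem!_eq_getElem?_getD, hq]
        have hrky : rk y = ((as.length + 1 + j : Nat) : Int) := by
          rw [← hg]; exact rk_at _ hjlt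
        refine Or.inr (Or.inl ?_)
        rw [hrkp, hrky]
        push_cast
        omega
  · refine Or.inr (Or.inl ?_)
    rw [rk_of_not_mem hyp, hrkp]
    omega

-- ===== VERDICT (by name: the statement is the Claim_ definition above) =====
theorem primary_set_py_spec : Claim_equal_primary_set_py := by
  intro sets _
  unfold Spec_primary_set_py primary_set_py primary_set_py_alt
  by_cases h0 : sets = []
  · simp [h0]
  · rw [if_neg h0, if_neg h0]
    by_cases h1 : "mosaic" ∈ sets ∧ "prizm" ∈ sets
    · rw [if_pos h1, if_pos h1]
      exact (sorted2_head_of_dom ["mosaic"] "mosaic" (by simp)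
        (by intro y hy; simp at hy; exact Or.inl hy)).symm
    · rw [if_neg h1, if_neg h1]
      cases hf : List.find? (fun p => decide (p ∈ sets)) priorityA with
      | some p =>
        obtain ⟨hps, hdom⟩ := dom_of_find?_eq_some hf
        exact (sorted2_head_of_dom sets p hps hdom).symm
      | none =>
        have hnil : PySem.List.sorted sets (fun x => x) ≠ [] := by
          rw [Ne, PySem.List.sorted_eq_nil_iff]
          exact h0
        obtain ⟨m, t, hsort⟩ : ∃ m t, PySem.List.sorted sets (fun x => x) = m :: t := by
          cases hs : PySem.List.sorted sets (fun x => x) with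
          | nil => exact absurd hs hnil
          | cons m t => exact ⟨m, t, rfl⟩
        rw [hsort]
        have hm : m ∈ sets := (PySem.List.mem_sorted sets (fun x => x) false m).mp
          (by rw [hsort]; exact List.mem_cons_self)
        have hnone : ∀ y ∈ sets, y ∉ priorityA := by
          intro y hy hyp
          have := List.find?_eq_none.mp hf y hyp
          simp at this
          exact this hy
        have hdom : ∀ y ∈ sets, y = m ∨ LL m y := by
          intro y hy
          have hle : m ≤ y := PySem.List.key_head_sorted_le sets (fun x => x) hsort y hy
          rcases lt_or_eq_of_le hle with hlt | rfl
          · exact Or.inr (Or.inr ⟨by rw [rk_of_not_mem (hnone m hm), rk_of_not_mem (hnone y hy)], hlt⟩)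
          · exact Or.inl rfl
        simp only [List.head?]
        exact (sorted2_head_of_dom sets m hm hdom).symm
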